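-- pv_equiv track=rewrite | github.com/batmen-lab/BioMANIA | src/dataloader/preprocess_retriever_data.py | preprocess_json_string
-- ===== SOURCE A (Python) =====
-- def preprocess_json_string(response: str) -> str:
--     """
--     Preprocesses a JSON string, replacing single quotes with double quotes for JSON keys
--     and ensuring internal single quotes within strings are preserved.
--
--     Parameters
--     ----------
--     response : str
--         The JSON string to preprocess.
--
--     Returns
--     -------
--     str
--         The preprocessed JSON string suitable for JSON parsing.
--     """
--     # Replace single quotes with double quotes while preserving internal single quotes in strings
--     in_string = False
--     processed_response = ""
--     for char in response:
--         if char == "'" and not in_string: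
--             processed_response += '"'
--         elif char == '"' and not in_string:
--             # Entering a string
--             in_string = True
--             processed_response += char
--         elif char == '"' and in_string:
--             # Exiting a string
--             in_string = False
--             processed_response += char
--         else:
--             processed_response += char
--     return processed_response
-- ===== SOURCE B (Python) =====
-- def preprocess_json_string(response: str) -> str:
--     """Split at double quotes: even-indexed segments are outside strings, so
--     replace their single quotes with double quotes; odd segments stay as-is."""
--     parts = response.split('"')
--     return '"'.join(
--         part.replace("'", '"') if i % 2 == 0 else part
--         for i, part in enumerate(parts)
--     )
-- ===== Notes on version B (the rewrite author's own statement) =====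
-- stated objective: simpler
-- what changed: Replaced the per-character in_string state machine with a split at double quotes, replacing single quotes only in the even-indexed (outside-string) segments and rejoining with a double quote.
import Mathlib
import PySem

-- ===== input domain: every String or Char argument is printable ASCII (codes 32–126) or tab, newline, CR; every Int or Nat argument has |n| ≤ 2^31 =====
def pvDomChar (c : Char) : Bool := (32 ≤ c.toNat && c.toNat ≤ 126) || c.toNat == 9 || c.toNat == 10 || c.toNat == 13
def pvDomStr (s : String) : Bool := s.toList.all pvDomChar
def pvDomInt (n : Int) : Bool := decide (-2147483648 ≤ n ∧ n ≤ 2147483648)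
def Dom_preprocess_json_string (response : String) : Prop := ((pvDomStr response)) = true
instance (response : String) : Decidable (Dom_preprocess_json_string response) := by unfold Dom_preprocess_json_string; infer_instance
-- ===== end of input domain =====

-- B replaces A's per-character in_string state machine by a split at '"' with
-- parity-alternating single-quote replacement and a rejoin (objective: simpler).

-- ===== PORT A =====
def preprocess_json_string (response : String) : String :=
  let st := response.toList.foldl (fun (s : Bool × List Char) c =>
    if c = '\'' ∧ s.1 = false then (s.1, s.2 ++ ['"'])
    else if c = '"' ∧ s.1 = false then (true, s.2 ++ [c])
    else if c = '"' ∧ s.1 = true then (false, s.2 ++ [c])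
    else (s.1, s.2 ++ [c])) (false, [])
  String.ofList st.2

-- ===== PORT B =====
def preprocess_json_string_alt (response : String) : String :=
  let parts := PySem.Chars.splitOn response.toList ['"']
  String.ofList (PySem.Chars.join ['"']
    ((PySem.List.enumerate parts 0).map (fun ip =>
      if PySem.Int.mod ip.1 2 = 0 then PySem.Chars.replace ip.2 ['\''] ['"'] else ip.2)))

-- ===== PRECONDITION & SPEC =====
def Spec_preprocess_json_string (response : String) (out : String) : Prop := out = preprocess_json_string_alt response
instance (response : String) (out : String) : Decidable (Spec_preprocess_json_string response out) := by unfold Spec_preprocess_json_string; infer_instance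

-- ===== CLAIM (what is proved, stated in full; the proofs are below) =====
def Claim_equal_preprocess_json_string : Prop := ∀ (response : String), Dom_preprocess_json_string response → Spec_preprocess_json_string response (preprocess_json_string response)

-- ===== LEMMAS AND PROOFS =====

/-- single-quote → double-quote on one character -/
def pvRepl (c : Char) : Char := if c = '\'' then '"' else c

/-- the common per-character behaviour; `b` is A's `in_string` flag -/
def pvMid : Bool → List Char → List Char
  | _, [] => []
  | b, c :: cs =>
    if c = '"' then '"' :: pvMid (!b) cs
    else (if b = false ∧ c = '\'' then '"' else c) :: pvMid b cs

/-- structural version of `split('"')` -/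
def pvSplitQ : List Char → List (List Char)
  | [] => [[]]
  | c :: cs =>
    if c = '"' then [] :: pvSplitQ cs
    else match pvSplitQ cs with
      | [] => [[c]]
      | p :: ps => (c :: p) :: ps

/-- parity-alternating replacement: `r = true` means the segment is outside a string -/
def pvAlt : Bool → List (List Char) → List (List Char)
  | _, [] => []
  | r, p :: ps => (if r then p.map pvRepl else p) :: pvAlt (!r) ps

theorem pvAlt_cons (r : Bool) (p : List Char) (ps : List (List Char)) :
    pvAlt r (p :: ps) = (if r then p.map pvRepl else p) :: pvAlt (!r) ps := rfl

theorem pv_replace_go (fuel : Nat) : ∀ (l acc : List Char), l.length ≤ fuel →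
    PySem.Chars.replace.go ['\''] ['"'] fuel l acc = acc.reverse ++ l.map pvRepl := by
  induction fuel with
  | zero => intro l acc h; simp at h; subst h; simp [PySem.Chars.replace.go]
  | succ n ih =>
    intro l acc h
    cases l with
    | nil => simp [PySem.Chars.replace.go]
    | cons c t =>
      rw [PySem.Chars.replace.go]
      by_cases hc : c = '\''
      · simp [hc, List.isPrefixOf, ih t _ (by simpa using h), pvRepl]
      · simp [List.isPrefixOf, hc, ih t _ (by simpa using h), pvRepl]
        intro h'; exact (hc h'.symm).elim

theorem pv_replace_eq_map (l : List Char) :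
    PySem.Chars.replace l ['\''] ['"'] = l.map pvRepl := by
  rw [PySem.Chars.replace]
  simp [pv_replace_go l.length l [] le_rfl]

theorem pvSplitQ_ne_nil (cs : List Char) : pvSplitQ cs ≠ [] := by
  cases cs with
  | nil => simp [pvSplitQ]
  | cons c t =>
    rw [pvSplitQ]
    split <;> simp_all
    split <;> simp

theorem pv_splitOn_go (fuel : Nat) : ∀ (l cur : List Char) (acc : List (List Char)),
    l.length < fuel →
    PySem.Chars.splitOn.go ['"'] fuel l cur acc =
      acc.reverse ++ (match pvSplitQ l with
        | [] => []
        | p :: ps => (cur.reverse ++ p) :: ps) := by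
  induction fuel with
  | zero => intro l cur acc h; omega
  | succ n ih =>
    intro l cur acc h
    cases l with
    | nil => simp [PySem.Chars.splitOn.go, pvSplitQ]
    | cons c t =>
      rw [PySem.Chars.splitOn.go]
      by_cases hc : c = '"'
      · subst hc
        simp only [List.isPrefixOf, BEq.rfl, Bool.and_true, List.length_singleton,
          List.drop_succ_cons, List.drop_zero]
        rw [ih t [] _ (by simpa using h)]
        rw [pvSplitQ]
        rcases ht : pvSplitQ t with _ | ⟨p, ps⟩
        · exact (pvSplitQ_ne_nil t ht).elim
        · simp
      · have hb : (('"' == c) && true) = false := by simp [Ne.symm hc]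
        simp only [List.isPrefixOf, hb, Bool.false_eq_true, if_false]
        rw [ih t (c :: cur) acc (by simpa using h)]
        rw [pvSplitQ]
        simp only [if_neg hc]
        rcases ht : pvSplitQ t with _ | ⟨p, ps⟩
        · exact (pvSplitQ_ne_nil t ht).elim
        · simp

theorem pv_splitOn_eq (l : List Char) :
    PySem.Chars.splitOn l ['"'] = pvSplitQ l := by
  rw [PySem.Chars.splitOn]
  rw [pv_splitOn_go (l.length+1) l [] [] (by omega)]
  rcases h : pvSplitQ l with _ | ⟨p, ps⟩
  · exact (pvSplitQ_ne_nil l h).elim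
  · simp

theorem pv_enum_alt (ps : List (List Char)) : ∀ (n : Int),
    (PySem.List.enumerate ps n).map (fun ip =>
        if PySem.Int.mod ip.1 2 = 0 then PySem.Chars.replace ip.2 ['\''] ['"'] else ip.2)
      = pvAlt (decide (PySem.Int.mod n 2 = 0)) ps := by
  induction ps with
  | nil => intro n; simp [PySem.List.enumerate_nil, pvAlt]
  | cons p ps ih =>
    intro n
    rw [PySem.List.enumerate_cons, List.map_cons, ih (n+1), pvAlt_cons]
    have hm : PySem.Int.mod n 2 = n % 2 := PySem.Int.mod_eq_emod_of_pos (by omega)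
    have hm1 : PySem.Int.mod (n+1) 2 = (n+1) % 2 := PySem.Int.mod_eq_emod_of_pos (by omega)
    by_cases h : n % 2 = 0
    · have h1 : ¬ ((n+1) % 2 = 0) := by omega
      simp [h, h1, pv_replace_eq_map]
    · have h1 : (n+1) % 2 = 0 := by omega
      simp [h, h1]

theorem pv_intercalate_cons (s a : List Char) (l : List (List Char)) (h : l ≠ []) :
    List.intercalate s (a :: l) = a ++ s ++ List.intercalate s l := by
  rcases l with _ | ⟨b, t⟩
  · exact (h rfl).elim
  · simp [List.intercalate, List.intersperse]

theorem pvAlt_ne_nil (r : Bool) (ps : List (List Char)) (h : ps ≠ []) : pvAlt r ps ≠ [] := by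
  rcases ps with _ | ⟨p, t⟩
  · exact (h rfl).elim
  · simp [pvAlt]

theorem pv_join_alt (cs : List Char) : ∀ (r : Bool),
    PySem.Chars.join ['"'] (pvAlt r (pvSplitQ cs)) = pvMid (!r) cs := by
  induction cs with
  | nil => intro r; simp [pvSplitQ, pvAlt, pvMid, PySem.Chars.join, List.intercalate]
  | cons c cs ih =>
    intro r
    rw [pvSplitQ, pvMid]
    by_cases hc : c = '"'
    · subst hc
      rw [if_pos rfl, if_pos rfl, pvAlt_cons]
      have hne := pvAlt_ne_nil (!r) _ (pvSplitQ_ne_nil cs)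
      rw [PySem.Chars.join, pv_intercalate_cons _ _ _ hne]
      have := ih (!r)
      rw [PySem.Chars.join] at this
      simp [this]
    · simp only [if_neg hc]
      rcases ht : pvSplitQ cs with _ | ⟨p, ps⟩
      · exact (pvSplitQ_ne_nil cs ht).elim
      · rw [pvAlt_cons]
        have hjoin : ∀ (d : Char) (X : List Char) (rest : List (List Char)),
            PySem.Chars.join ['"'] ((d :: X) :: rest) = d :: PySem.Chars.join ['"'] (X :: rest) := by
          intro d X rest
          rcases rest with _ | ⟨b, t⟩ <;> simp [PySem.Chars.join, List.intercalate, List.intersperse]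
        have key := ih r
        rw [ht, pvAlt_cons] at key
        by_cases hr : r = true
        · subst hr
          simp only [if_true] at key ⊢
          rw [List.map_cons, hjoin, key]
          by_cases hc2 : c = '\'' <;> simp [pvRepl, hc2]
        · have hr' : r = false := by simpa using hr
          subst hr'
          simp only [Bool.false_eq_true, if_false] at key ⊢
          rw [hjoin, key]
          simp

theorem pv_fold_mid (cs : List Char) : ∀ (b : Bool) (acc : List Char),
    (cs.foldl (fun (s : Bool × List Char) c =>
      if c = '\'' ∧ s.1 = false then (s.1, s.2 ++ ['"'])
      else if c = '"' ∧ s.1 = false then (true, s.2 ++ [c])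
      else if c = '"' ∧ s.1 = true then (false, s.2 ++ [c])
      else (s.1, s.2 ++ [c])) (b, acc)).2 = acc ++ pvMid b cs := by
  induction cs with
  | nil => intro b acc; simp [pvMid]
  | cons c cs ih =>
    intro b acc
    rw [List.foldl_cons, pvMid]
    by_cases hq : c = '"'
    · subst hq
      rcases b with _ | _
      · simp [ih]
      · simp [ih]
    · by_cases hs : c = '\''
      · subst hs
        rcases b with _ | _ <;> simp [ih, hq]
      · rcases b with _ | _ <;> simp [ih, hq, hs]

-- ===== VERDICT (by name: the statement is the Claim_ definition above) =====
theorem preprocess_json_string_spec : Claim_equal_preprocess_json_string := by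
  intro response _
  unfold Spec_preprocess_json_string
  simp only [preprocess_json_string, preprocess_json_string_alt]
  rw [pv_splitOn_eq]
  rw [pv_enum_alt _ 0, pv_fold_mid]
  have h0 : (decide (PySem.Int.mod 0 2 = 0)) = true := by decide
  rw [h0, pv_join_alt]
  simp
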